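-- pv_equiv track=rewrite | github.com/rsagawa/latent_tokenizer_compare | analyze_retrieval_actionrec_id_contrib.py | _drop_motif_occurrences
-- ===== SOURCE A (Python) =====
-- from typing import Callable, Dict, Iterable, List, Optional, Sequence, Set, Tuple
--
-- def _drop_motif_occurrences(
--     token_ids: Sequence[int],
--     motif: Sequence[int],
--     drop_all_occurrences: bool,
-- ) -> Tuple[List[int], int]:
--     seq = [int(x) for x in token_ids]
--     sub = [int(x) for x in motif]
--     n = len(seq)
--     m = len(sub)
--     if m <= 0 or n < m:
--         return seq, 0
--     out: List[int] = []
--     i = 0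
--     removed = 0
--     while i < n:
--         if i + m <= n and seq[i : i + m] == sub:
--             removed += 1
--             i += m
--             if not bool(drop_all_occurrences):
--                 out.extend(seq[i:])
--                 break
--             continue
--         out.append(seq[i])
--         i += 1
--     return out, removed
-- ===== SOURCE B (Python) =====
-- from typing import List, Sequence, Tuple
--
--
-- def _drop_motif_occurrences(
--     token_ids: Sequence[int],
--     motif: Sequence[int],
--     drop_all_occurrences: bool,
-- ) -> Tuple[List[int], int]:
--     # Two-phase alternative: first collect the greedy non-overlapping match
--     # start positions, then assemble the output from the kept segments.
--     seq = [int(x) for x in token_ids]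
--     sub = [int(x) for x in motif]
--     n = len(seq)
--     m = len(sub)
--     if m == 0:
--         return seq, 0
--     starts: List[int] = []
--     i = 0
--     while i <= n - m:
--         if seq[i : i + m] == sub:
--             starts.append(i)
--             i += m
--             if not bool(drop_all_occurrences):
--                 break
--         else:
--             i += 1
--     if not starts:
--         return seq, 0
--     out: List[int] = []
--     prev = 0
--     for s in starts:
--         out.extend(seq[prev:s])
--         prev = s + m
--     out.extend(seq[prev:])
--     return out, len(starts)
-- ===== Notes on version B (the rewrite author's own statement) =====
-- stated objective: alternative
-- what changed: A interleaves scanning and output-building in one while loop with a break; B first collects the greedy non-overlapping match start positions and then assembles the output by bulk-copying the untouched segments between them in a second pass.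
import Mathlib
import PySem

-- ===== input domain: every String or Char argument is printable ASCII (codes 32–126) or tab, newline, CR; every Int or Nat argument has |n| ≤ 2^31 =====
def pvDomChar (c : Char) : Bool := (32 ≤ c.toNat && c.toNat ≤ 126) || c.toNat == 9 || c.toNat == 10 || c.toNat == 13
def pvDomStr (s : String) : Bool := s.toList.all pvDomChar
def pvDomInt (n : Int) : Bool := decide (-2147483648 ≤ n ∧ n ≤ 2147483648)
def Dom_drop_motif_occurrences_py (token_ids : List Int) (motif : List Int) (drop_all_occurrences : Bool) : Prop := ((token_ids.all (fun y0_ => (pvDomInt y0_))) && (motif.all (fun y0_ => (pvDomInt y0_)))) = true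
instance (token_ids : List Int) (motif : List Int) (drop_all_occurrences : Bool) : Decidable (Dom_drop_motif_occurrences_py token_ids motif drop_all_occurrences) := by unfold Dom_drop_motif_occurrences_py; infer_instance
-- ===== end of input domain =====

-- B replaces A's single interleaved scan-and-copy loop by a two-phase scheme
-- (collect greedy match starts, then assemble the kept segments); alternative
-- structure, same exact return value.


-- ===== PORT A =====
-- A's while loop; state (i, out, removed).  seq[i:i+m] = (seq.drop i).take m and
-- seq[i:] = seq.drop i are exact since all indices are nonnegative.
-- (hm : 0 < sub.length) is only a termination hypothesis: A's top-level guard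
-- guarantees it before the loop is entered.
def aLoop (seq sub : List Int) (dropAll : Bool) (hm : 0 < sub.length)
    (i : Nat) (out : List Int) (removed : Int) : List Int × Int :=
  if h : i < seq.length then
    if i + sub.length ≤ seq.length ∧ (seq.drop i).take sub.length = sub then
      if dropAll then
        aLoop seq sub dropAll hm (i + sub.length) out (removed + 1)
      else
        (out ++ seq.drop (i + sub.length), removed + 1)
    else
      aLoop seq sub dropAll hm (i + 1) (out ++ [seq[i]'h]) removed
  else (out, removed)
termination_by seq.length - i
decreasing_by all_goals omega

def drop_motif_occurrences_py (token_ids : List Int) (motif : List Int) (drop_all_occurrences : Bool) : List Int × Int :=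
  if h : motif.length ≤ 0 ∨ token_ids.length < motif.length then (token_ids, 0)
  else aLoop token_ids motif drop_all_occurrences (by omega) 0 [] 0

-- ===== PORT B =====
-- Phase 1: the greedy non-overlapping match start positions (Python's
-- 'while i <= n - m' is exactly 'i + m ≤ n' on naturals here).
def bStarts (seq sub : List Int) (dropAll : Bool) (hm : 0 < sub.length)
    (i : Nat) : List Nat :=
  if h : i + sub.length ≤ seq.length then
    if (seq.drop i).take sub.length = sub then
      i :: (if dropAll then bStarts seq sub dropAll hm (i + sub.length) else [])
    else bStarts seq sub dropAll hm (i + 1)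
  else []
termination_by seq.length + 1 - i
decreasing_by all_goals omega

-- Phase 2: Python's 'for s in starts' assembly loop, state (out, prev).
def bAssemble (seq : List Int) (m : Nat) (starts : List Nat) : List Int :=
  let fin := starts.foldl
    (fun (acc : List Int × Nat) s => (acc.1 ++ (seq.drop acc.2).take (s - acc.2), s + m))
    ([], 0)
  fin.1 ++ seq.drop fin.2

def drop_motif_occurrences_py_alt (token_ids : List Int) (motif : List Int) (drop_all_occurrences : Bool) : List Int × Int :=
  if h : motif.length = 0 then (token_ids, 0)
  else
    let starts := bStarts token_ids motif drop_all_occurrences (by omega) 0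
    if starts = [] then (token_ids, 0)
    else (bAssemble token_ids motif.length starts, (starts.length : Int))

-- ===== PRECONDITION & SPEC =====
def Spec_drop_motif_occurrences_py (token_ids : List Int) (motif : List Int) (drop_all_occurrences : Bool) (out : List Int × Int) : Prop := out = drop_motif_occurrences_py_alt token_ids motif drop_all_occurrences
instance (token_ids : List Int) (motif : List Int) (drop_all_occurrences : Bool) (out : List Int × Int) : Decidable (Spec_drop_motif_occurrences_py token_ids motif drop_all_occurrences out) := by unfold Spec_drop_motif_occurrences_py; infer_instance

-- ===== CLAIM (what is proved, stated in full; the proofs are below) =====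
def Claim_equal_drop_motif_occurrences_py : Prop := ∀ (token_ids : List Int) (motif : List Int) (drop_all_occurrences : Bool), Dom_drop_motif_occurrences_py token_ids motif drop_all_occurrences → Spec_drop_motif_occurrences_py token_ids motif drop_all_occurrences (drop_motif_occurrences_py token_ids motif drop_all_occurrences)

-- ===== LEMMAS AND PROOFS =====

-- Recursive characterisation of the assembled output starting at position i.
def segFrom (seq : List Int) (m : Nat) (i : Nat) : List Nat → List Int
  | [] => seq.drop i
  | s :: rest => (seq.drop i).take (s - i) ++ segFrom seq m (s + m) rest

lemma bAssemble_foldl (seq : List Int) (m : Nat) :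
    ∀ (starts : List Nat) (out : List Int) (prev : Nat),
      (let fin := starts.foldl
        (fun (acc : List Int × Nat) s => (acc.1 ++ (seq.drop acc.2).take (s - acc.2), s + m))
        (out, prev)
       fin.1 ++ seq.drop fin.2) = out ++ segFrom seq m prev starts := by
  intro starts
  induction starts with
  | nil => intro out prev; simp [segFrom]
  | cons s rest ih =>
      intro out prev
      simp only [List.foldl_cons, segFrom]
      rw [ih]
      simp [List.append_assoc]

lemma bAssemble_eq (seq : List Int) (m : Nat) (starts : List Nat) :
    bAssemble seq m starts = segFrom seq m 0 starts := by
  have h := bAssemble_foldl seq m starts [] 0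
  simpa [bAssemble] using h

-- Every collected start is at or after the scan position.
lemma bStarts_ge (seq sub : List Int) (dropAll : Bool) (hm : 0 < sub.length) :
    ∀ (k i : Nat), seq.length ≤ i + k →
      ∀ s ∈ bStarts seq sub dropAll hm i, i ≤ s := by
  intro k
  induction k with
  | zero =>
      intro i hk s hs
      rw [bStarts] at hs
      rw [dif_neg (by omega)] at hs
      simp at hs
  | succ k ih =>
      intro i hk s hs
      rw [bStarts] at hs
      by_cases h1 : i + sub.length ≤ seq.length
      · rw [dif_pos h1] at hs
        by_cases h2 : (seq.drop i).take sub.length = sub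
        · rw [if_pos h2] at hs
          rcases List.mem_cons.mp hs with h | h
          · omega
          · by_cases hd : dropAll
            · simp only [if_pos hd] at h
              have := ih (i + sub.length) (by omega) s h
              omega
            · simp [hd] at h
        · rw [if_neg h2] at hs
          have := ih (i + 1) (by omega) s hs
          omega
      · rw [dif_neg h1] at hs
        simp at hs

lemma segFrom_cons (seq : List Int) (m i : Nat) (h1 : i < seq.length)
    (st : List Nat) (hge : ∀ s ∈ st, i + 1 ≤ s) :
    segFrom seq m i st = seq[i]'h1 :: segFrom seq m (i + 1) st := by
  cases st with
  | nil =>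
      simp only [segFrom]
      exact List.drop_eq_getElem_cons h1
  | cons s rest =>
      have hs : i + 1 ≤ s := hge s (List.mem_cons_self ..)
      simp only [segFrom]
      rw [List.drop_eq_getElem_cons h1]
      have h3 : s - i = (s - (i + 1)) + 1 := by omega
      rw [h3, List.take_succ_cons]
      simp

-- The main loop-vs-phases correspondence, by induction on remaining length.
lemma aLoop_eq_aux (seq sub : List Int) (dropAll : Bool) (hm : 0 < sub.length) :
    ∀ (k i : Nat), seq.length ≤ i + k → ∀ (out : List Int) (removed : Int),
      aLoop seq sub dropAll hm i out removed =
        (out ++ segFrom seq sub.length i (bStarts seq sub dropAll hm i),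
         removed + ((bStarts seq sub dropAll hm i).length : Int)) := by
  intro k
  induction k with
  | zero =>
      intro i hk out removed
      rw [aLoop, bStarts]
      rw [dif_neg (by omega : ¬ i < seq.length),
          dif_neg (by omega : ¬ i + sub.length ≤ seq.length)]
      simp [segFrom, List.drop_eq_nil_of_le (by omega : seq.length ≤ i)]
  | succ k ih =>
      intro i hk out removed
      by_cases h0 : i < seq.length
      · rw [aLoop, dif_pos h0]
        by_cases h1 : i + sub.length ≤ seq.length
        · by_cases h2 : (seq.drop i).take sub.length = sub
          · have hbs : bStarts seq sub dropAll hm i =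
                i :: (if dropAll then bStarts seq sub dropAll hm (i + sub.length) else []) := by
              rw [bStarts, dif_pos h1, if_pos h2]
            rw [if_pos ⟨h1, h2⟩, hbs]
            by_cases hd : dropAll
            · rw [if_pos hd, if_pos hd]
              rw [ih (i + sub.length) (by omega) out (removed + 1)]
              simp only [segFrom, List.length_cons, Prod.mk.injEq]
              refine ⟨by simp, by push_cast; ring⟩
            · rw [if_neg hd, if_neg hd]
              simp [segFrom]
          · have hbs : bStarts seq sub dropAll hm i = bStarts seq sub dropAll hm (i + 1) := by
              rw [bStarts, dif_pos h1, if_neg h2]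
            rw [if_neg (by tauto), hbs]
            rw [ih (i + 1) (by omega) (out ++ [seq[i]'h0]) removed]
            rw [segFrom_cons seq sub.length i h0 _
                  (bStarts_ge seq sub dropAll hm (seq.length) (i+1) (by omega))]
            simp
        · have hbs : bStarts seq sub dropAll hm i = [] := by
            rw [bStarts, dif_neg h1]
          have hb1 : bStarts seq sub dropAll hm (i + 1) = [] := by
            rw [bStarts, dif_neg (by omega)]
          rw [if_neg (by tauto), hbs]
          rw [ih (i + 1) (by omega) (out ++ [seq[i]'h0]) removed, hb1]
          simp only [segFrom, List.length_nil]
          rw [List.drop_eq_getElem_cons h0]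
          simp
      · rw [aLoop, dif_neg h0, bStarts, dif_neg (by omega)]
        simp [segFrom, List.drop_eq_nil_of_le (by omega : seq.length ≤ i)]

lemma top_eq (seq sub : List Int) (dropAll : Bool) :
    drop_motif_occurrences_py seq sub dropAll = drop_motif_occurrences_py_alt seq sub dropAll := by
  unfold drop_motif_occurrences_py drop_motif_occurrences_py_alt
  by_cases hm0 : sub.length = 0
  · rw [dif_pos (by omega), dif_pos hm0]
  · rw [dif_neg hm0]
    by_cases hn : seq.length < sub.length
    · rw [dif_pos (by omega)]
      have hb : bStarts seq sub dropAll (by omega) 0 = [] := by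
        rw [bStarts, dif_neg (by omega)]
      simp [hb]
    · rw [dif_neg (by omega)]
      rw [aLoop_eq_aux seq sub dropAll (by omega) seq.length 0 (by omega) [] 0]
      set st := bStarts seq sub dropAll (by omega : 0 < sub.length) 0 with hst
      by_cases he : st = []
      · simp [he, segFrom]
      · rw [if_neg he, bAssemble_eq]
        simp

-- ===== VERDICT (by name: the statement is the Claim_ definition above) =====
theorem drop_motif_occurrences_py_spec : Claim_equal_drop_motif_occurrences_py := by
  intro seq sub dropAll _
  unfold Spec_drop_motif_occurrences_py
  exact top_eq seq sub dropAll
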